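-- pv_equiv track=rewrite | github.com/fyellin/PuzzleSolver | magpie/Magpie212-2020-08.py | verify_is_legal_grid
-- ===== SOURCE A (Python) =====
-- def verify_is_legal_grid(acrosses: dict[tuple[int, int], int], downs: dict[tuple[int, int], int]) \
--         -> dict[int, tuple[int, int]] | None:
--     clue_starts = set(acrosses.keys()).union(downs.keys())
--     number_to_clue_start = {number: clue_start for number, clue_start in enumerate(sorted(clue_starts), start=1)}
--     for number, clue_start in number_to_clue_start.items():
--         value = (clue_start in acrosses) + (clue_start in downs)
--         assert 1 <= value <= 2
--         expected_value = 2 if number in (2, 3, 6, 16, 21) else 1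
--         if value != expected_value:
--             return None
--     return number_to_clue_start
-- ===== SOURCE B (Python) =====
-- def verify_is_legal_grid(acrosses, downs):
--     a = sorted(acrosses)
--     d = sorted(downs)
--     i = j = num = 0
--     result = {}
--     while i < len(a) or j < len(d):
--         num += 1
--         if j == len(d) or (i < len(a) and a[i] < d[j]):
--             clue_start, double = a[i], False
--             i += 1
--         elif i == len(a) or d[j] < a[i]:
--             clue_start, double = d[j], False
--             j += 1
--         else:
--             clue_start, double = a[i], True
--             i += 1
--             j += 1
--         if double != (num in (2, 3, 6, 16, 21)):
--             return None
--         result[num] = clue_start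
--     return result
-- ===== Notes on version B (the rewrite author's own statement) =====
-- stated objective: alternative
-- what changed: B sorts the two key sets separately and runs a single two-pointer merge that classifies each clue start as double when both heads coincide, numbering and checking in the same pass, instead of A's sort-the-union-then-enumerate pass with per-clue membership tests against both dicts.
import Mathlib
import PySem

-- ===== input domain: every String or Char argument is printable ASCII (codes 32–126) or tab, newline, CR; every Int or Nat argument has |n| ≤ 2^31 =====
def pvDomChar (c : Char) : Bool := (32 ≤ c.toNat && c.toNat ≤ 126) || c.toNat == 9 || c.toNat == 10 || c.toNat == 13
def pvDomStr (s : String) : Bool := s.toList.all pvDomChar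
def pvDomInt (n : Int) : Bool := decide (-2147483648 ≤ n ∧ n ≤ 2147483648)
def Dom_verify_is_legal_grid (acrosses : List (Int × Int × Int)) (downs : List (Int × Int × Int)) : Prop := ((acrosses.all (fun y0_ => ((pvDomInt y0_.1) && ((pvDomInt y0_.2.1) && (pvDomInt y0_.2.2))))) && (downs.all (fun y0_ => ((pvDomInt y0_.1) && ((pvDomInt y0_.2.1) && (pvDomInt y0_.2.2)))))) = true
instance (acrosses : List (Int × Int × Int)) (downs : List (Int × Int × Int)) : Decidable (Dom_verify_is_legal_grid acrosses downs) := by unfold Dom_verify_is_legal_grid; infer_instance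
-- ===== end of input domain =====

-- B replaces A's sort-the-union-then-test-memberships pass by a two-pointer merge of the two
-- separately-sorted key lists, numbering and checking each clue start in the same single pass;
-- alternative decomposition, same asymptotic cost.


-- ===== PORT A =====
-- keys of a dict[tuple[int,int], int] given as a flattened association list (k1, k2, v)
def keysOf (d : List (Int × Int × Int)) : List (Int × Int) := d.map (fun t => (t.1, t.2.1))

-- A's for-loop over number_to_clue_start.items(), with early 'return None'.
-- The 'assert 1 <= value <= 2' is omitted: every clue_start comes from the union of the
-- two key sets, so value ≥ 1 always and the assert provably never fires.
def vLoop (aK dK : List (Int × Int)) (res : List (Int × Int × Int)) : List (Int × Int × Int) → Option (List (Int × Int × Int))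
  | [] => some res
  | t :: rest =>
      let value : Int := (if t.2 ∈ aK then 1 else 0) + (if t.2 ∈ dK then 1 else 0)
      let expected : Int := if t.1 ∈ ([2, 3, 6, 16, 21] : List Int) then 2 else 1
      if value ≠ expected then none else vLoop aK dK res rest

def verify_is_legal_grid (acrosses : List (Int × Int × Int)) (downs : List (Int × Int × Int)) : Option (List (Int × Int × Int)) :=
  let aK := keysOf acrosses
  let dK := keysOf downs
  let clue_starts := PySem.Set.union (PySem.Set.ofList aK) dK
  let number_to_clue_start := PySem.List.enumerate (PySem.List.sorted2 clue_starts (·.1) (·.2)) 1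
  vLoop aK dK number_to_clue_start number_to_clue_start

-- ===== PORT B =====
-- Python's tuple comparison 'a[i] < d[j]' on (int, int) pairs
def lexLt (a b : Int × Int) : Bool := a.1 < b.1 || (a.1 == b.1 && a.2 < b.2)

def bNums : List Int := [2, 3, 6, 16, 21]

-- loop body after the clue start is classified: the double/expected check, then result[num] = cs
def bStep (num : Int) (cs : Int × Int) (double : Bool) (rest : Option (List (Int × Int × Int))) : Option (List (Int × Int × Int)) :=
  if double != decide (num ∈ bNums) then none else rest.map (fun r => (num, cs) :: r)

-- Source B's while loop: the two index pointers become the two remaining suffixes; num is the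
-- number the next clue start will receive; fuel is the exact iteration bound len(a) + len(d)
def bLoop : Nat → Int → List (Int × Int) → List (Int × Int) → Option (List (Int × Int × Int))
  | _, _, [], [] => some []
  | 0, _, _, _ => none  -- fuel exhausted: never reached when fuel ≥ |xs| + |ys|
  | fuel + 1, num, x :: xs, [] => bStep num x false (bLoop fuel (num + 1) xs [])
  | fuel + 1, num, [], y :: ys => bStep num y false (bLoop fuel (num + 1) [] ys)
  | fuel + 1, num, x :: xs, y :: ys =>
      if lexLt x y then bStep num x false (bLoop fuel (num + 1) xs (y :: ys))
      else if lexLt y x then bStep num y false (bLoop fuel (num + 1) (x :: xs) ys)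
      else bStep num x true (bLoop fuel (num + 1) xs ys)

def verify_is_legal_grid_alt (acrosses : List (Int × Int × Int)) (downs : List (Int × Int × Int)) : Option (List (Int × Int × Int)) :=
  let a := PySem.List.sorted2 (PySem.Set.ofList (keysOf acrosses)) (·.1) (·.2)
  let d := PySem.List.sorted2 (PySem.Set.ofList (keysOf downs)) (·.1) (·.2)
  bLoop (a.length + d.length) 1 a d

-- ===== PRECONDITION & SPEC =====
def Spec_verify_is_legal_grid (acrosses : List (Int × Int × Int)) (downs : List (Int × Int × Int)) (out : Option (List (Int × Int × Int))) : Prop := out = verify_is_legal_grid_alt acrosses downs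
instance (acrosses : List (Int × Int × Int)) (downs : List (Int × Int × Int)) (out : Option (List (Int × Int × Int))) : Decidable (Spec_verify_is_legal_grid acrosses downs out) := by unfold Spec_verify_is_legal_grid; infer_instance

-- ===== CLAIM (what is proved, stated in full; the proofs are below) =====
def Claim_equal_verify_is_legal_grid : Prop := ∀ (acrosses : List (Int × Int × Int)) (downs : List (Int × Int × Int)), Dom_verify_is_legal_grid acrosses downs → Spec_verify_is_legal_grid acrosses downs (verify_is_legal_grid acrosses downs)

-- ===== LEMMAS AND PROOFS =====

-- strict lexicographic order on (Int, Int), as a Prop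
def llt (a b : Int × Int) : Prop := a.1 < b.1 ∨ (a.1 = b.1 ∧ a.2 < b.2)

theorem lexLt_iff (a b : Int × Int) : lexLt a b = true ↔ llt a b := by
  simp [lexLt, llt]

theorem llt_irrefl (a : Int × Int) : ¬ llt a a := by simp [llt]

theorem llt_trans {a b c : Int × Int} (h1 : llt a b) (h2 : llt b c) : llt a c := by
  rcases h1 with h1 | h1 <;> rcases h2 with h2 | h2 <;> simp_all [llt] <;> omega

theorem llt_asymm {a b : Int × Int} (h : llt a b) : ¬ llt b a := by
  rcases h with h | h <;> simp_all [llt] <;> omega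

theorem eq_of_not_llt {a b : Int × Int} (h1 : ¬ llt a b) (h2 : ¬ llt b a) : a = b := by
  simp only [llt, not_or, not_and] at h1 h2
  have : a.1 = b.1 ∧ a.2 = b.2 := by constructor <;> omega
  exact Prod.ext this.1 this.2

-- proof-side mirror of bLoop's merge: the sequence of classified clue starts
def mergeA : List (Int × Int) → List (Int × Int) → List ((Int × Int) × Bool)
  | [], [] => []
  | x :: xs, [] => (x, false) :: mergeA xs []
  | [], y :: ys => (y, false) :: mergeA [] ys
  | x :: xs, y :: ys =>
      if lexLt x y then (x, false) :: mergeA xs (y :: ys)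
      else if lexLt y x then (y, false) :: mergeA (x :: xs) ys
      else (x, true) :: mergeA xs ys
termination_by xs ys => xs.length + ys.length


theorem mergeA_left (x : Int × Int) (xs : List (Int × Int)) :
    mergeA (x :: xs) [] = (x, false) :: mergeA xs [] := by simp only [mergeA]

theorem mergeA_right (y : Int × Int) (ys : List (Int × Int)) :
    mergeA [] (y :: ys) = (y, false) :: mergeA [] ys := by simp only [mergeA]

theorem mergeA_lt {x y : Int × Int} (xs ys : List (Int × Int)) (h : lexLt x y = true) :
    mergeA (x :: xs) (y :: ys) = (x, false) :: mergeA xs (y :: ys) := by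
  simp only [mergeA]; rw [if_pos h]

theorem mergeA_gt {x y : Int × Int} (xs ys : List (Int × Int))
    (h1 : ¬ lexLt x y = true) (h2 : lexLt y x = true) :
    mergeA (x :: xs) (y :: ys) = (y, false) :: mergeA (x :: xs) ys := by
  simp only [mergeA]; rw [if_neg h1, if_pos h2]

theorem mergeA_same {x y : Int × Int} (xs ys : List (Int × Int))
    (h1 : ¬ lexLt x y = true) (h2 : ¬ lexLt y x = true) :
    mergeA (x :: xs) (y :: ys) = (x, true) :: mergeA xs ys := by
  simp only [mergeA]; rw [if_neg h1, if_neg h2]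

-- proof-side mirror of bLoop's check-and-number pass over an already classified sequence
def chk : Int → List ((Int × Int) × Bool) → Option (List (Int × Int × Int))
  | _, [] => some []
  | num, p :: rest =>
      if p.2 != decide (num ∈ bNums) then none
      else (chk (num + 1) rest).map (fun r => (num, p.1) :: r)

theorem bLoop_eq_chk_mergeA (fuel : Nat) (num : Int) (xs ys : List (Int × Int))
    (hf : xs.length + ys.length ≤ fuel) :
    bLoop fuel num xs ys = chk num (mergeA xs ys) := by
  induction xs, ys using mergeA.induct generalizing fuel num with
  | case1 => cases fuel <;> simp [bLoop, mergeA, chk]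
  | case2 x xs ih =>
      cases fuel with
      | zero => simp at hf
      | succ f =>
          rw [show bLoop (f + 1) num (x :: xs) [] = bStep num x false (bLoop f (num + 1) xs []) from
            by simp [bLoop]]
          rw [mergeA_left, ih f (num + 1) (by simp at hf ⊢; omega)]; rfl
  | case3 y ys ih =>
      cases fuel with
      | zero => simp at hf
      | succ f =>
          rw [show bLoop (f + 1) num ([] : List (Int × Int)) (y :: ys)
              = bStep num y false (bLoop f (num + 1) [] ys) from by simp [bLoop]]
          rw [mergeA_right, ih f (num + 1) (by simp at hf ⊢; omega)]; rfl
  | case4 x xs y ys hlt ih =>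
      cases fuel with
      | zero => simp at hf
      | succ f =>
          rw [show bLoop (f + 1) num (x :: xs) (y :: ys)
              = bStep num x false (bLoop f (num + 1) xs (y :: ys)) from
            by simp only [bLoop]; rw [if_pos hlt]]
          rw [mergeA_lt xs ys hlt, ih f (num + 1) (by simp at hf ⊢; omega)]; rfl
  | case5 x xs y ys hlt hgt ih =>
      cases fuel with
      | zero => simp at hf
      | succ f =>
          rw [show bLoop (f + 1) num (x :: xs) (y :: ys)
              = bStep num y false (bLoop f (num + 1) (x :: xs) ys) from
            by simp only [bLoop]; rw [if_neg hlt, if_pos hgt]]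
          rw [mergeA_gt xs ys hlt hgt, ih f (num + 1) (by simp at hf ⊢; omega)]; rfl
  | case6 x xs y ys hlt hgt ih =>
      cases fuel with
      | zero => simp at hf
      | succ f =>
          rw [show bLoop (f + 1) num (x :: xs) (y :: ys)
              = bStep num x true (bLoop f (num + 1) xs ys) from
            by simp only [bLoop]; rw [if_neg hlt, if_neg hgt]]
          rw [mergeA_same xs ys hlt hgt, ih f (num + 1) (by simp at hf ⊢; omega)]; rfl

theorem mem_fst_mergeA (xs ys : List (Int × Int)) (c : Int × Int) :
    c ∈ (mergeA xs ys).map (·.1) ↔ c ∈ xs ∨ c ∈ ys := by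
  induction xs, ys using mergeA.induct with
  | case1 => simp [mergeA]
  | case2 x xs ih => rw [mergeA_left]; simp [ih]
  | case3 y ys ih => rw [mergeA_right]; simp [ih]
  | case4 x xs y ys hlt ih => rw [mergeA_lt xs ys hlt]; simp [ih]; tauto
  | case5 x xs y ys hlt hgt ih => rw [mergeA_gt xs ys hlt hgt]; simp [ih]; tauto
  | case6 x xs y ys hlt hgt ih =>
      have hxy : x = y := eq_of_not_llt (fun h => hlt ((lexLt_iff x y).mpr h))
        (fun h => hgt ((lexLt_iff y x).mpr h))
      subst hxy
      rw [mergeA_same xs ys hlt hgt]; simp [ih]; tauto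

theorem pairwise_fst_mergeA (xs ys : List (Int × Int))
    (hx : xs.Pairwise llt) (hy : ys.Pairwise llt) :
    ((mergeA xs ys).map (·.1)).Pairwise llt := by
  induction xs, ys using mergeA.induct with
  | case1 => simp [mergeA]
  | case2 x xs ih =>
      rw [List.pairwise_cons] at hx
      rw [mergeA_left, List.map_cons, List.pairwise_cons]
      refine ⟨?_, ih hx.2 hy⟩
      intro c hc
      rcases (mem_fst_mergeA xs [] c).mp hc with h | h
      · exact hx.1 c h
      · simp at h
  | case3 y ys ih =>
      rw [List.pairwise_cons] at hy
      rw [mergeA_right, List.map_cons, List.pairwise_cons]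
      refine ⟨?_, ih hx hy.2⟩
      intro c hc
      rcases (mem_fst_mergeA [] ys c).mp hc with h | h
      · simp at h
      · exact hy.1 c h
  | case4 x xs y ys hlt ih =>
      rw [List.pairwise_cons] at hx
      rw [List.pairwise_cons] at hy
      have hxy : llt x y := (lexLt_iff x y).mp hlt
      rw [mergeA_lt xs ys hlt, List.map_cons, List.pairwise_cons]
      refine ⟨?_, ih hx.2 (List.pairwise_cons.mpr hy)⟩
      intro c hc
      rcases (mem_fst_mergeA xs (y :: ys) c).mp hc with h | h
      · exact hx.1 c h
      · rcases List.mem_cons.mp h with rfl | h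
        · exact hxy
        · exact llt_trans hxy (hy.1 c h)
  | case5 x xs y ys hlt hgt ih =>
      rw [List.pairwise_cons] at hx
      rw [List.pairwise_cons] at hy
      have hyx : llt y x := (lexLt_iff y x).mp hgt
      rw [mergeA_gt xs ys hlt hgt, List.map_cons, List.pairwise_cons]
      refine ⟨?_, ih (List.pairwise_cons.mpr hx) hy.2⟩
      intro c hc
      rcases (mem_fst_mergeA (x :: xs) ys c).mp hc with h | h
      · rcases List.mem_cons.mp h with rfl | h
        · exact hyx
        · exact llt_trans hyx (hx.1 c h)
      · exact hy.1 c h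
  | case6 x xs y ys hlt hgt ih =>
      have hxy : x = y := eq_of_not_llt (fun h => hlt ((lexLt_iff x y).mpr h))
        (fun h => hgt ((lexLt_iff y x).mpr h))
      subst hxy
      rw [List.pairwise_cons] at hx hy
      rw [mergeA_same xs ys hlt hgt, List.map_cons, List.pairwise_cons]
      refine ⟨?_, ih hx.2 hy.2⟩
      intro c hc
      rcases (mem_fst_mergeA xs ys c).mp hc with h | h
      · exact hx.1 c h
      · exact hy.1 c h

theorem flag_mergeA (xs ys : List (Int × Int))
    (hx : xs.Pairwise llt) (hy : ys.Pairwise llt) :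
    ∀ p ∈ mergeA xs ys, p.2 = decide (p.1 ∈ xs ∧ p.1 ∈ ys) := by
  induction xs, ys using mergeA.induct with
  | case1 => simp [mergeA]
  | case2 x xs ih =>
      rw [List.pairwise_cons] at hx
      intro p hp
      rw [mergeA_left] at hp
      rcases List.mem_cons.mp hp with rfl | hp
      · simp
      · have := ih hx.2 hy p hp
        simp only [List.not_mem_nil, and_false, decide_false] at this ⊢
        exact this
  | case3 y ys ih =>
      rw [List.pairwise_cons] at hy
      intro p hp
      rw [mergeA_right] at hp
      rcases List.mem_cons.mp hp with rfl | hp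
      · simp
      · have := ih hx hy.2 p hp
        simp only [List.not_mem_nil, false_and, decide_false] at this ⊢
        exact this
  | case4 x xs y ys hlt ih =>
      rw [List.pairwise_cons] at hx
      rw [List.pairwise_cons] at hy
      have hxy : llt x y := (lexLt_iff x y).mp hlt
      have hxny : x ∉ y :: ys := by
        intro h
        rcases List.mem_cons.mp h with rfl | h
        · exact llt_irrefl x hxy
        · exact llt_irrefl x (llt_trans hxy (hy.1 x h))
      intro p hp
      rw [mergeA_lt xs ys hlt] at hp
      rcases List.mem_cons.mp hp with rfl | hp
      · simp [hxny]
      · have := ih hx.2 (List.pairwise_cons.mpr hy) p hp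
        by_cases hpx : p.1 = x
        · rw [this, hpx]
          simp [hxny]
        · rw [this]
          simp [List.mem_cons, hpx]
  | case5 x xs y ys hlt hgt ih =>
      rw [List.pairwise_cons] at hx
      rw [List.pairwise_cons] at hy
      have hyx : llt y x := (lexLt_iff y x).mp hgt
      have hynx : y ∉ x :: xs := by
        intro h
        rcases List.mem_cons.mp h with rfl | h
        · exact llt_irrefl y hyx
        · exact llt_irrefl y (llt_trans hyx (hx.1 y h))
      intro p hp
      rw [mergeA_gt xs ys hlt hgt] at hp
      rcases List.mem_cons.mp hp with rfl | hp
      · simp [hynx]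
      · have := ih (List.pairwise_cons.mpr hx) hy.2 p hp
        by_cases hpy : p.1 = y
        · rw [this, hpy]
          simp [hynx]
        · rw [this]
          simp [List.mem_cons, hpy]
  | case6 x xs y ys hlt hgt ih =>
      have hxy : x = y := eq_of_not_llt (fun h => hlt ((lexLt_iff x y).mpr h))
        (fun h => hgt ((lexLt_iff y x).mpr h))
      subst hxy
      rw [List.pairwise_cons] at hx hy
      have hxnxs : x ∉ xs := fun h => llt_irrefl x (hx.1 x h)
      have hxnys : x ∉ ys := fun h => llt_irrefl x (hy.1 x h)
      intro p hp
      rw [mergeA_same xs ys hlt hgt] at hp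
      rcases List.mem_cons.mp hp with rfl | hp
      · simp
      · have hmem := (mem_fst_mergeA xs ys p.1).mp (List.mem_map_of_mem hp)
        have hpx : p.1 ≠ x := by
          rintro rfl
          rcases hmem with h | h
          · exact hxnxs h
          · exact hxnys h
        have := ih hx.2 hy.2 p hp
        rw [this]
        simp [List.mem_cons, hpx]

-- chk over a classified sequence is A's "all clues pass" test on its enumeration
theorem chk_map (f : Int × Int → Bool) (l : List (Int × Int)) (num : Int) :
    chk num (l.map (fun c => (c, f c))) =
      if (PySem.List.enumerate l num).all (fun t => f t.2 == decide (t.1 ∈ bNums))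
      then some (PySem.List.enumerate l num) else none := by
  induction l generalizing num with
  | nil => simp [chk, PySem.List.enumerate]
  | cons c l ih =>
      rw [List.map_cons, PySem.List.enumerate_cons, List.all_cons]
      have hstep : chk num ((c, f c) :: l.map (fun c => (c, f c)))
          = if (f c != decide (num ∈ bNums)) = true then none
            else (chk (num + 1) (l.map (fun c => (c, f c)))).map (fun r => (num, c) :: r) := rfl
      rw [hstep, ih]
      by_cases h : f c = decide (num ∈ bNums)
      · rw [h]
        simp only [bne_self_eq_false, Bool.false_eq_true, if_false, beq_self_eq_true, Bool.true_and]
        by_cases hrest : (PySem.List.enumerate l (num + 1)).all (fun t => f t.2 == decide (t.1 ∈ bNums)) = true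
        · rw [if_pos hrest, if_pos hrest]; rfl
        · rw [if_neg hrest, if_neg hrest]; rfl
      · have h1 : (f c != decide (num ∈ bNums)) = true := by
          simp [bne, h]
        have h2 : (f c == decide (num ∈ bNums)) = false := by
          simp [h]
        rw [if_pos h1, h2]
        simp

-- the per-clue test of A, as a boolean on memberships
def clueOK (aK dK : List (Int × Int)) (t : Int × Int × Int) : Bool :=
  decide (t.2 ∈ aK ∧ t.2 ∈ dK) == decide (t.1 ∈ ([2, 3, 6, 16, 21] : List Int))

-- A's loop succeeds iff every remaining clue passes, provided every clue start is a key of one of the dicts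
theorem vLoop_char (aK dK : List (Int × Int)) (res : List (Int × Int × Int)) (rest : List (Int × Int × Int))
    (hmem : ∀ t ∈ rest, t.2 ∈ aK ∨ t.2 ∈ dK) :
    vLoop aK dK res rest = if rest.all (clueOK aK dK) then some res else none := by
  induction rest with
  | nil => simp [vLoop]
  | cons t rest ih =>
    have ht := hmem t (by simp)
    have hrest : ∀ u ∈ rest, u.2 ∈ aK ∨ u.2 ∈ dK := fun u hu => hmem u (by simp [hu])
    have hcond : ((if t.2 ∈ aK then (1 : Int) else 0) + (if t.2 ∈ dK then 1 else 0)
        = (if t.1 ∈ ([2, 3, 6, 16, 21] : List Int) then 2 else 1)) ↔ clueOK aK dK t = true := by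
      unfold clueOK
      by_cases ha : t.2 ∈ aK <;> by_cases hd : t.2 ∈ dK <;>
        by_cases hn : t.1 ∈ ([2, 3, 6, 16, 21] : List Int) <;>
        simp [ha, hd, hn] <;> first | omega | tauto
    simp only [vLoop, List.all_cons]
    by_cases hok : clueOK aK dK t = true
    · rw [if_neg (not_not_intro (hcond.mpr hok)), ih hrest]
      simp only [hok, Bool.true_and]
    · rw [if_pos (fun he => hok (hcond.mp he))]
      simp [hok]

-- a sorted2 of a duplicate-free (Int, Int) list is strictly lexicographically increasing
def lexBf (a b : Int × Int) : Bool :=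
  decide (a.1 < b.1) || (!decide (b.1 < a.1) && decide (a.2 < b.2))

def lle (a b : Int × Int) : Prop := ¬ llt b a

theorem lexBf_iff (a b : Int × Int) : lexBf a b = true ↔ llt a b := by
  simp [lexBf, llt]; omega

theorem pairwise_lle_insertBy (x : Int × Int) (acc : List (Int × Int))
    (h : acc.Pairwise lle) : (PySem.List.insertBy lexBf x acc).Pairwise lle := by
  induction acc with
  | nil => simp [PySem.List.insertBy]
  | cons y ys ih =>
      rw [List.pairwise_cons] at h
      rw [PySem.List.insertBy]
      by_cases hb : lexBf x y = true
      · rw [if_pos hb]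
        have hxy : llt x y := (lexBf_iff x y).mp hb
        refine List.pairwise_cons.mpr ⟨?_, List.pairwise_cons.mpr h⟩
        intro c hc
        rcases List.mem_cons.mp hc with rfl | hc
        · exact llt_asymm hxy
        · intro hcx
          exact h.1 c hc (llt_trans hcx hxy)
      · rw [if_neg hb]
        refine List.pairwise_cons.mpr ⟨?_, ih h.2⟩
        intro c hc
        rcases (PySem.List.mem_insertBy lexBf x c ys).mp hc with hcx | hc
        · exact fun hcy => hb ((lexBf_iff x y).mpr (hcx ▸ hcy))
        · exact h.1 c hc

theorem pairwise_lle_foldl (xs : List (Int × Int)) (acc : List (Int × Int))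
    (h : acc.Pairwise lle) :
    (xs.foldl (fun acc x => PySem.List.insertBy lexBf x acc) acc).Pairwise lle := by
  induction xs generalizing acc with
  | nil => exact h
  | cons x xs ih => exact ih _ (pairwise_lle_insertBy x acc h)

theorem pairwise_llt_sorted2 (xs : List (Int × Int)) (h : xs.Nodup) :
    (PySem.List.sorted2 xs (·.1) (·.2)).Pairwise llt := by
  have heq : PySem.List.sorted2 xs (·.1) (·.2) =
      xs.foldl (fun acc x => PySem.List.insertBy lexBf x acc) [] := rfl
  have hle : (PySem.List.sorted2 xs (·.1) (·.2)).Pairwise lle := by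
    rw [heq]; exact pairwise_lle_foldl xs [] (by simp)
  have hnd : (PySem.List.sorted2 xs (·.1) (·.2)).Nodup :=
    (PySem.List.sorted2_perm xs (·.1) (·.2) false).nodup_iff.mpr h
  exact (hle.and hnd).imp (fun {a b} hab => by
    rcases hab with ⟨h1, h2⟩
    rcases (em (llt a b)) with h | h
    · exact h
    · exact absurd (eq_of_not_llt h h1) h2)

-- B's result, characterised like A's
theorem bLoop_char (aS dS : List (Int × Int))
    (hx : aS.Pairwise llt) (hy : dS.Pairwise llt) :
    bLoop (aS.length + dS.length) 1 aS dS =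
      (if (PySem.List.enumerate ((mergeA aS dS).map (·.1)) 1).all
          (fun t => decide (t.2 ∈ aS ∧ t.2 ∈ dS) == decide (t.1 ∈ bNums))
       then some (PySem.List.enumerate ((mergeA aS dS).map (·.1)) 1) else none) := by
  rw [bLoop_eq_chk_mergeA _ 1 aS dS (le_refl _)]
  have hm : mergeA aS dS = ((mergeA aS dS).map (·.1)).map
      (fun c => (c, decide (c ∈ aS ∧ c ∈ dS))) := by
    rw [List.map_map]
    conv_lhs => rw [← List.map_id (mergeA aS dS)]
    apply List.map_congr_left
    intro p hp
    have := flag_mergeA aS dS hx hy p hp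
    simp only [Function.comp, id]
    rw [← this]
  conv_lhs => rw [hm]
  exact chk_map _ _ 1

theorem verify_is_legal_grid_spec' (acrosses : List (Int × Int × Int)) (downs : List (Int × Int × Int)) :
    verify_is_legal_grid acrosses downs = verify_is_legal_grid_alt acrosses downs := by
  unfold verify_is_legal_grid verify_is_legal_grid_alt
  set aK := keysOf acrosses with haK
  set dK := keysOf downs with hdK
  set aS := PySem.List.sorted2 (PySem.Set.ofList aK) (·.1) (·.2) with haS
  set dS := PySem.List.sorted2 (PySem.Set.ofList dK) (·.1) (·.2) with hdS
  set u := PySem.List.sorted2 (PySem.Set.union (PySem.Set.ofList aK) dK) (·.1) (·.2) with hu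
  set nts := PySem.List.enumerate u 1 with hnts
  -- memberships transfer between the sorted lists and the raw key lists
  have memA : ∀ c : Int × Int, c ∈ aS ↔ c ∈ aK := fun c => by
    rw [haS, (PySem.List.sorted2_perm _ _ _ _).mem_iff, PySem.Set.mem_ofList]
  have memD : ∀ c : Int × Int, c ∈ dS ↔ c ∈ dK := fun c => by
    rw [hdS, (PySem.List.sorted2_perm _ _ _ _).mem_iff, PySem.Set.mem_ofList]
  have memU : ∀ c : Int × Int, c ∈ u ↔ c ∈ aK ∨ c ∈ dK := fun c => by
    rw [hu, (PySem.List.sorted2_perm _ _ _ _).mem_iff, PySem.Set.mem_union,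
      PySem.Set.mem_ofList]
  -- both strictly sorted sequences of clue starts coincide
  have hpa : aS.Pairwise llt := pairwise_llt_sorted2 _ (PySem.Set.nodup_ofList aK)
  have hpd : dS.Pairwise llt := pairwise_llt_sorted2 _ (PySem.Set.nodup_ofList dK)
  have hpu : u.Pairwise llt := pairwise_llt_sorted2 _
    (PySem.Set.nodup_union _ dK (PySem.Set.nodup_ofList aK))
  have hpm : ((mergeA aS dS).map (·.1)).Pairwise llt := pairwise_fst_mergeA aS dS hpa hpd
  have hmu : (mergeA aS dS).map (·.1) = u := by
    apply List.eq_of_perm_of_sorted (le := llt)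
      (fun a b _ _ h1 h2 => absurd h2 (llt_asymm h1)) hpm hpu
    rw [List.perm_ext_iff_of_nodup
      (hpm.imp (fun {a b} h => by exact fun he => llt_irrefl a (he ▸ h)))
      (hpu.imp (fun {a b} h => by exact fun he => llt_irrefl a (he ▸ h)))]
    intro c
    rw [mem_fst_mergeA, memA, memD, memU]
  rw [bLoop_char aS dS hpa hpd, hmu]
  -- every clue start is a key of one of the dicts
  have hmem : ∀ t ∈ nts, t.2 ∈ aK ∨ t.2 ∈ dK := by
    intro t ht
    have h1 : t.2 ∈ u := by
      have := List.mem_map_of_mem (f := fun t : Int × Int × Int => t.2) ht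
      rwa [hnts, PySem.List.map_snd_enumerate] at this
    exact (memU t.2).mp h1
  rw [vLoop_char aK dK nts nts hmem]
  -- the two all-tests agree pointwise
  have hptw : ∀ t : Int × Int × Int,
      (decide (t.2 ∈ aS ∧ t.2 ∈ dS) == decide (t.1 ∈ bNums)) = clueOK aK dK t := by
    intro t
    unfold clueOK bNums
    rw [decide_eq_decide.mpr (and_congr (memA t.2) (memD t.2))]
  rw [show (fun t : Int × Int × Int => decide (t.2 ∈ aS ∧ t.2 ∈ dS) == decide (t.1 ∈ bNums))
    = clueOK aK dK from funext hptw]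

-- ===== VERDICT (by name: the statement is the Claim_ definition above) =====
theorem verify_is_legal_grid_spec : Claim_equal_verify_is_legal_grid := by
  intro acrosses downs _
  exact verify_is_legal_grid_spec' acrosses downs
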